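-- pv_equiv track=rewrite | github.com/seonjiwon/Python-Algorithm | algorithm/Implementation/[Gold3] 경사로 14890.py | can_build_slope
-- ===== SOURCE A (Python) =====
-- def can_build_slope(line, L):
--     N = len(line)
--     built = [False] * N  # 경사로가 놓였는지 체크
--
--     for i in range(1, N):
--         if abs(line[i] - line[i - 1]) > 1:  # 높이 차이가 1 초과 → 불가능
--             return False
--
--         # 높이가 올라가는 경우 (현재 칸이 이전 칸보다 1 높음)
--         if line[i] == line[i - 1] + 1:
--             # **경사로를 놓을 `L`개 칸이 연속적으로 존재하는지 먼저 확인**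
--             for j in range(1, L + 1):
--                 if i - j < 0 or line[i - j] != line[i - 1] or built[i - j]:
--                     return False  # 설치 불가능하면 즉시 종료
--
--             # 모든 조건을 통과한 경우에만 `built` 표시
--             for j in range(1, L + 1):
--                 built[i - j] = True
--
--                 # 높이가 내려가는 경우 (현재 칸이 이전 칸보다 1 낮음)
--         elif line[i] == line[i - 1] - 1:
--             # **경사로를 놓을 `L`개 칸이 연속적으로 존재하는지 먼저 확인**
--             for j in range(L):
--                 if i + j >= N or line[i + j] != line[i] or built[i + j]:
--                     return False  # 설치 불가능하면 즉시 종료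
--
--             # 모든 조건을 통과한 경우에만 `built` 표시
--             for j in range(L):
--                 built[i + j] = True
--
--     return True
-- ===== SOURCE B (Python) =====
-- def can_build_slope(line, L):
--     # single pass: cnt = usable run length ending here (negative while a down-ramp still owes cells)
--     cnt = 1 if line else 0
--     for i in range(1, len(line)):
--         d = line[i] - line[i - 1]
--         if d == 0:
--             cnt += 1
--         elif d == 1:
--             if cnt < L:
--                 return False
--             cnt = 1
--         elif d == -1:
--             if cnt < 0:
--                 return False
--             cnt = 1 - L
--         else:
--             return False
--     return cnt >= 0
-- ===== Notes on version B (the rewrite author's own statement) =====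
-- stated objective: simpler
-- what changed: Replaces the built[] bookkeeping array and the two inner L-length verification/marking loops with a single pass that tracks one integer counter (usable run length, negative while a down-ramp still owes cells).
import Mathlib
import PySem

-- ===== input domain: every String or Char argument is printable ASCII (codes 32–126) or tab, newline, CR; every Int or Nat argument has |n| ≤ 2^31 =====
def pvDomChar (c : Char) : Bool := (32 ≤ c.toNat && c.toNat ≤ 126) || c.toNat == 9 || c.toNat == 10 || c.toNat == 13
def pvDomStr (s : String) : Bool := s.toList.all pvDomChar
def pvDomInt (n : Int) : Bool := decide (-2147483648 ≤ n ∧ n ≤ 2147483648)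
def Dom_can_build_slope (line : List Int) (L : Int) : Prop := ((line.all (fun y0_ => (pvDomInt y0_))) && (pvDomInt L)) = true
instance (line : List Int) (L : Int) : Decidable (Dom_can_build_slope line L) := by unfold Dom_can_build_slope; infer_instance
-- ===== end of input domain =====

-- B replaces A's built[] array and its two inner L-length check/mark loops by a single
-- pass with one integer counter (usable run length, negative while a down-ramp owes cells).


-- ===== PORT A =====
-- A's loop over i in range(1, N) with early returns, a built[] list, and the two inner
-- loops over j (check, then mark).  All list indices A reads are guarded/in range in the
-- Python (i-j<0 and i+j>=N are checked first), so access is List.getD; the Python guard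
-- 'i - j < 0' becomes 'decide (j ≤ i)' negated, short-circuited exactly like Python's 'or'.
def pvAGo (line : List Int) (L : Int) (N : Nat) : List Bool → List Nat → Bool
  | _, [] => true
  | built, i :: rest =>
    if (line.getD i 0 - line.getD (i - 1) 0).natAbs > 1 then false
    else if line.getD i 0 == line.getD (i - 1) 0 + 1 then
      if (List.range' 1 L.toNat).all (fun j =>
            decide (j ≤ i) && (line.getD (i - j) 0 == line.getD (i - 1) 0)
              && !(built.getD (i - j) false)) then
        pvAGo line L N ((List.range' 1 L.toNat).foldl (fun bu j => bu.set (i - j) true) built) rest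
      else false
    else if line.getD i 0 == line.getD (i - 1) 0 - 1 then
      if (List.range L.toNat).all (fun j =>
            decide (i + j < N) && (line.getD (i + j) 0 == line.getD i 0)
              && !(built.getD (i + j) false)) then
        pvAGo line L N ((List.range L.toNat).foldl (fun bu j => bu.set (i + j) true) built) rest
      else false
    else pvAGo line L N built rest

def can_build_slope (line : List Int) (L : Int) : Bool :=
  let N := line.length
  pvAGo line L N (List.replicate N false) (List.range' 1 (N - 1))

-- ===== PORT B =====
def pvBGo (line : List Int) (L : Int) : Int → List Nat → Bool
  | cnt, [] => decide (0 ≤ cnt)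
  | cnt, i :: rest =>
    let d := line.getD i 0 - line.getD (i - 1) 0
    if d == 0 then pvBGo line L (cnt + 1) rest
    else if d == 1 then (if cnt < L then false else pvBGo line L 1 rest)
    else if d == -1 then (if cnt < 0 then false else pvBGo line L (1 - L) rest)
    else false

def can_build_slope_alt (line : List Int) (L : Int) : Bool :=
  pvBGo line L (if line.isEmpty then 0 else 1) (List.range' 1 (line.length - 1))

-- ===== PRECONDITION & SPEC =====
def Spec_can_build_slope (line : List Int) (L : Int) (out : Bool) : Prop := out = can_build_slope_alt line L
instance (line : List Int) (L : Int) (out : Bool) : Decidable (Spec_can_build_slope line L out) := by unfold Spec_can_build_slope; infer_instance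

-- ===== CLAIM (what is proved, stated in full; the proofs are below) =====
def Claim_equal_can_build_slope : Prop := ∀ (line : List Int) (L : Int), Dom_can_build_slope line L → Spec_can_build_slope line L (can_build_slope line L)



-- ===== LEMMAS AND PROOFS =====

-- one-step reduction lemmas for the two loops
lemma pvB_step_flat (line : List Int) (L cnt : Int) (i : Nat) (rest : List Nat)
    (h : line.getD i 0 - line.getD (i - 1) 0 = 0) :
    pvBGo line L cnt (i :: rest) = pvBGo line L (cnt + 1) rest := by
  simp only [pvBGo]
  rw [if_pos (by simp only [beq_iff_eq]; omega)]

lemma pvB_step_up (line : List Int) (L cnt : Int) (i : Nat) (rest : List Nat)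
    (h : line.getD i 0 - line.getD (i - 1) 0 = 1) :
    pvBGo line L cnt (i :: rest) = if cnt < L then false else pvBGo line L 1 rest := by
  simp only [pvBGo]
  rw [if_neg (by simp only [beq_iff_eq]; omega), if_pos (by simp only [beq_iff_eq]; omega)]

lemma pvB_step_dn (line : List Int) (L cnt : Int) (i : Nat) (rest : List Nat)
    (h : line.getD i 0 - line.getD (i - 1) 0 = -1) :
    pvBGo line L cnt (i :: rest) = if cnt < 0 then false else pvBGo line L (1 - L) rest := by
  simp only [pvBGo]
  rw [if_neg (by simp only [beq_iff_eq]; omega), if_neg (by simp only [beq_iff_eq]; omega),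
      if_pos (by simp only [beq_iff_eq]; omega)]

lemma pvB_step_bad (line : List Int) (L cnt : Int) (i : Nat) (rest : List Nat)
    (h0 : line.getD i 0 - line.getD (i - 1) 0 ≠ 0)
    (h1 : line.getD i 0 - line.getD (i - 1) 0 ≠ 1)
    (h2 : line.getD i 0 - line.getD (i - 1) 0 ≠ -1) :
    pvBGo line L cnt (i :: rest) = false := by
  simp only [pvBGo]
  rw [if_neg (by simp only [beq_iff_eq]; exact h0), if_neg (by simp only [beq_iff_eq]; exact h1),
      if_neg (by simp only [beq_iff_eq]; exact h2)]

lemma pvA_step_big (line : List Int) (L : Int) (N : Nat) (built : List Bool) (i : Nat)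
    (rest : List Nat) (h : (line.getD i 0 - line.getD (i - 1) 0).natAbs > 1) :
    pvAGo line L N built (i :: rest) = false := by
  simp only [pvAGo]
  rw [if_pos h]

lemma pvA_step_up (line : List Int) (L : Int) (N : Nat) (built : List Bool) (i : Nat)
    (rest : List Nat) (h : line.getD i 0 = line.getD (i - 1) 0 + 1) :
    pvAGo line L N built (i :: rest) =
      if ((List.range' 1 L.toNat).all fun j =>
            decide (j ≤ i) && (line.getD (i - j) 0 == line.getD (i - 1) 0)
              && !built.getD (i - j) false) then
        pvAGo line L N ((List.range' 1 L.toNat).foldl (fun bu j => bu.set (i - j) true) built) rest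
      else false := by
  simp only [pvAGo]
  rw [if_neg (by omega), if_pos (by simp only [beq_iff_eq]; omega)]

lemma pvA_step_dn (line : List Int) (L : Int) (N : Nat) (built : List Bool) (i : Nat)
    (rest : List Nat) (h1 : line.getD i 0 ≠ line.getD (i - 1) 0 + 1)
    (h2 : line.getD i 0 = line.getD (i - 1) 0 - 1) :
    pvAGo line L N built (i :: rest) =
      if ((List.range L.toNat).all fun j =>
            decide (i + j < N) && (line.getD (i + j) 0 == line.getD i 0)
              && !built.getD (i + j) false) then
        pvAGo line L N ((List.range L.toNat).foldl (fun bu j => bu.set (i + j) true) built) rest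
      else false := by
  simp only [pvAGo]
  rw [if_neg (by omega), if_neg (by simp only [beq_iff_eq]; exact h1),
      if_pos (by simp only [beq_iff_eq]; omega)]

lemma pvA_step_flat (line : List Int) (L : Int) (N : Nat) (built : List Bool) (i : Nat)
    (rest : List Nat) (h : line.getD i 0 = line.getD (i - 1) 0) :
    pvAGo line L N built (i :: rest) = pvAGo line L N built rest := by
  simp only [pvAGo]
  rw [if_neg (by omega), if_neg (by simp only [beq_iff_eq]; omega),
      if_neg (by simp only [beq_iff_eq]; omega)]

-- fold-of-set helpers (A's mark loops)
lemma pvFoldSetLen (js : List Nat) (g : Nat → Nat) (built : List Bool) :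
    (js.foldl (fun bu j => bu.set (g j) true) built).length = built.length := by
  induction js generalizing built with
  | nil => rfl
  | cons j js ih => rw [List.foldl_cons, ih, List.length_set]

lemma pvFoldSetGetD_notin (js : List Nat) (g : Nat → Nat) (built : List Bool) (k : Nat)
    (h : ∀ j ∈ js, g j ≠ k) :
    (js.foldl (fun bu j => bu.set (g j) true) built).getD k false = built.getD k false := by
  induction js generalizing built with
  | nil => rfl
  | cons j js ih =>
    rw [List.foldl_cons, ih _ (fun j' hj' => h j' (List.mem_cons_of_mem _ hj'))]
    simp [List.getD_eq_getElem?_getD, List.getElem?_set_ne (h j (List.mem_cons_self ..))]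

lemma pvFoldSetGetD_mono (js : List Nat) (g : Nat → Nat) (built : List Bool) (k : Nat)
    (h : built.getD k false = true) :
    (js.foldl (fun bu j => bu.set (g j) true) built).getD k false = true := by
  induction js generalizing built with
  | nil => exact h
  | cons j js ih =>
    rw [List.foldl_cons]
    apply ih
    have hk : k < built.length := by
      by_contra hk
      rw [List.getD_eq_getElem?_getD, List.getElem?_eq_none (by omega)] at h
      simp at h
    by_cases hjk : g j = k
    · subst hjk
      simp [List.getD_eq_getElem?_getD, List.getElem?_set_self hk]
    · rw [List.getD_eq_getElem?_getD, List.getElem?_set_ne hjk, ← List.getD_eq_getElem?_getD, h]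

lemma pvFoldSetGetD_in (js : List Nat) (g : Nat → Nat) (built : List Bool) (k : Nat)
    (hk : k < built.length) (h : ∃ j ∈ js, g j = k) :
    (js.foldl (fun bu j => bu.set (g j) true) built).getD k false = true := by
  induction js generalizing built with
  | nil => simp at h
  | cons j js ih =>
    rw [List.foldl_cons]
    by_cases hjk : g j = k
    · apply pvFoldSetGetD_mono
      subst hjk
      simp [List.getD_eq_getElem?_getD, List.getElem?_set_self hk]
    · rcases h with ⟨j', hj', hj'k⟩
      rcases List.mem_cons.mp hj' with rfl | hj'
      · exact absurd hj'k hjk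
      · exact ih (built.set (g j) true) (by rw [List.length_set]; exact hk) ⟨j', hj', hj'k⟩

-- a chain of adjacent equalities propagates to the start of the run
lemma pvChainEq (line : List Int) (i m : Nat)
    (h : ∀ j' < m, line.getD (i + 1 + j') 0 = line.getD (i + j') 0) :
    ∀ t ≤ m, line.getD (i + t) 0 = line.getD i 0 := by
  intro t ht
  induction t with
  | zero => rfl
  | succ n ihn =>
    have h1 := h n (by omega)
    rw [show i + (n + 1) = i + 1 + n by omega, h1]
    exact ihn (by omega)

-- B returns false once the counter is negative and stays negative through the current run
lemma pvBStuck (line : List Int) (L : Int) (hL : 1 ≤ L) :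
    ∀ (k i : Nat) (cnt : Int),
      (∀ j : Nat, j ≤ k →
        (∀ j' : Nat, j' < j → line.getD (i + j') 0 = line.getD (i + j' - 1) 0) →
        cnt + (j : Int) < 0) →
      pvBGo line L cnt (List.range' i k) = false := by
  intro k
  induction k with
  | zero =>
    intro i cnt hC
    have h0 : cnt + (0 : Nat) < 0 := hC 0 (by omega) (fun j' hj' => absurd hj' (by omega))
    simp [pvBGo]
    omega
  | succ k ih =>
    intro i cnt hC
    have h0 : cnt + (0 : Nat) < 0 := hC 0 (by omega) (fun j' hj' => absurd hj' (by omega))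
    rw [List.range'_succ]
    by_cases hd0 : line.getD i 0 - line.getD (i - 1) 0 = 0
    · rw [pvB_step_flat _ _ _ _ _ hd0]
      apply ih
      intro j hj hchain
      have hch : ∀ j' < j + 1, line.getD (i + j') 0 = line.getD (i + j' - 1) 0 := by
        intro j' hj'
        cases j' with
        | zero =>
          simp only [Nat.add_zero]
          omega
        | succ n =>
          have hcn := hchain n (by omega)
          rw [show i + (n + 1) = i + 1 + n by omega]
          exact hcn
      have := hC (j + 1) (by omega) hch
      push_cast at this ⊢
      omega
    · by_cases hd1 : line.getD i 0 - line.getD (i - 1) 0 = 1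
      · rw [pvB_step_up _ _ _ _ _ hd1, if_pos (by omega)]
      · by_cases hdm : line.getD i 0 - line.getD (i - 1) 0 = -1
        · rw [pvB_step_dn _ _ _ _ _ hdm, if_pos (by omega)]
        · rw [pvB_step_bad _ _ _ _ _ hd0 hd1 hdm]

-- A's up-ramp check equals B's counter test, under the invariant
lemma pvUpCheckEq (line : List Int) (L : Int) (hL : 1 ≤ L) (built : List Bool) (i s r : Nat)
    (hsi : s < i) (hsr : s ≤ r) (hrN : r ≤ line.length) (hiN : i < line.length)
    (hrun : ∀ m, s ≤ m → m < i → line.getD m 0 = line.getD (i - 1) 0)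
    (hmin : s = 0 ∨ line.getD (s - 1) 0 ≠ line.getD s 0)
    (hb : ∀ m, s ≤ m → m < line.length → built.getD m false = decide (m < r)) :
    ((List.range' 1 L.toNat).all (fun j =>
        decide (j ≤ i) && (line.getD (i - j) 0 == line.getD (i - 1) 0)
          && !built.getD (i - j) false)) = decide (r + L.toNat ≤ i) := by
  have hL1 : 1 ≤ L.toNat := by omega
  by_cases hgood : r + L.toNat ≤ i
  · rw [decide_eq_true hgood, List.all_eq_true]
    intro j hj
    rw [List.mem_range'_1] at hj
    have h1 : i - j < i := by omega
    have h2 : s ≤ i - j := by omega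
    simp only [Bool.and_eq_true, decide_eq_true_eq, beq_iff_eq, Bool.not_eq_true']
    refine ⟨⟨by omega, hrun _ h2 h1⟩, ?_⟩
    rw [hb _ h2 (by omega)]
    simp
    omega
  · rw [decide_eq_false hgood, List.all_eq_false]
    by_cases hli : L.toNat ≤ i
    · by_cases hpend : i < r
      · refine ⟨1, by rw [List.mem_range'_1]; omega, ?_⟩
        have hbi := hb (i - 1) (by omega) (by omega)
        simp only [Bool.and_eq_true, decide_eq_true_eq, beq_iff_eq, Bool.not_eq_true']
        rw [hbi]
        intro hcontra
        have : decide (i - 1 < r) = true := by simp; omega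
        simp_all
      · by_cases hsltr : s < r
        · refine ⟨i - r + 1, by rw [List.mem_range'_1]; omega, ?_⟩
          have hset : i - (i - r + 1) = r - 1 := by omega
          have hbr := hb (r - 1) (by omega) (by omega)
          simp only [Bool.and_eq_true, decide_eq_true_eq, beq_iff_eq, Bool.not_eq_true', hset, hbr]
          intro hcontra
          have : decide (r - 1 < r) = true := by simp; omega
          simp_all
        · -- s = r : the run starts exactly at the built frontier; minimality breaks the check
          have hs1 : 1 ≤ s := by omega
          refine ⟨i - s + 1, by rw [List.mem_range'_1]; omega, ?_⟩
          have hset : i - (i - s + 1) = s - 1 := by omega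
          simp only [Bool.and_eq_true, decide_eq_true_eq, beq_iff_eq, Bool.not_eq_true', hset]
          intro hcontra
          rcases hmin with h0 | hne
          · omega
          · exact hne (by rw [hcontra.1.2, hrun s (le_refl s) hsi])
    · refine ⟨L.toNat, by rw [List.mem_range'_1]; omega, ?_⟩
      simp only [Bool.and_eq_true, decide_eq_true_eq]
      intro hcontra
      omega

-- main induction for L ≥ 1: A with its built[] state equals B with its counter
lemma pvMainPos (line : List Int) (L : Int) (hL : 1 ≤ L) :
    ∀ (k i : Nat) (built : List Bool) (cnt : Int) (s r : Nat),
      1 ≤ i → i + k = line.length →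
      s < i → s ≤ r → r ≤ line.length → cnt = (i : Int) - r →
      (∀ m, s ≤ m → m < i → line.getD m 0 = line.getD (i - 1) 0) →
      (s = 0 ∨ line.getD (s - 1) 0 ≠ line.getD s 0) →
      built.length = line.length →
      (∀ m, s ≤ m → m < line.length → built.getD m false = decide (m < r)) →
      (∀ m, i ≤ m → m < r → line.getD m 0 = line.getD (i - 1) 0) →
      pvAGo line L line.length built (List.range' i k) = pvBGo line L cnt (List.range' i k) := by
  intro k
  induction k with
  | zero =>
    intro i built cnt s r hi hik hsi hsr hrN hcnt hrun hmin hbl hb hP3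
    simp [pvAGo, pvBGo]
    omega
  | succ k ih =>
    intro i built cnt s r hi hik hsi hsr hrN hcnt hrun hmin hbl hb hP3
    have hiN : i < line.length := by omega
    have hL1 : 1 ≤ L.toNat := by omega
    rw [List.range'_succ]
    by_cases hbig : (line.getD i 0 - line.getD (i - 1) 0).natAbs > 1
    · rw [pvA_step_big _ _ _ _ _ _ hbig,
          pvB_step_bad _ _ _ _ _ (by omega) (by omega) (by omega)]
    · by_cases hup : line.getD i 0 = line.getD (i - 1) 0 + 1
      · -- up step
        rw [pvA_step_up _ _ _ _ _ _ hup, pvB_step_up _ _ _ _ _ (by omega),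
            pvUpCheckEq line L hL built i s r hsi hsr hrN hiN hrun hmin hb]
        by_cases hpass : r + L.toNat ≤ i
        · rw [decide_eq_true hpass, if_pos rfl, if_neg (by omega)]
          apply ih (i + 1) _ 1 i i (by omega) (by omega) (by omega) (by omega) (by omega)
            (by omega)
          · intro m hm1 hm2
            have hmi : m = i := by omega
            subst hmi
            rfl
          · right
            intro hcontra
            omega
          · rw [pvFoldSetLen]
            exact hbl
          · intro m hm1 hm2
            rw [pvFoldSetGetD_notin _ _ _ _ (by
              intro j hj
              rw [List.mem_range'_1] at hj
              omega)]
            rw [hb m (by omega) hm2]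
            simp
            omega
          · intro m hm1 hm2
            omega
        · rw [decide_eq_false hpass, if_neg (by simp), if_pos (by omega)]
      · by_cases hdn : line.getD i 0 = line.getD (i - 1) 0 - 1
        · -- down step
          rw [pvA_step_dn _ _ _ _ _ _ hup hdn, pvB_step_dn _ _ _ _ _ (by omega)]
          by_cases hpend : (i : Int) < r
          · -- A reads built[i] = true at j = 0; B sees a negative counter
            have hfail : ((List.range L.toNat).all fun j =>
                decide (i + j < line.length) && (line.getD (i + j) 0 == line.getD i 0)
                  && !built.getD (i + j) false) = false := by
              rw [List.all_eq_false]
              refine ⟨0, by rw [List.mem_range]; omega, ?_⟩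
              have hbi := hb i (by omega) hiN
              simp only [Bool.and_eq_true, decide_eq_true_eq, beq_iff_eq, Bool.not_eq_true',
                Nat.add_zero]
              rw [hbi]
              intro hcontra
              have : decide (i < r) = true := by simp; omega
              simp_all
            rw [hfail, if_neg (by simp), if_pos (by omega)]
          · by_cases hok : ∀ j, j < L.toNat →
                i + j < line.length ∧ line.getD (i + j) 0 = line.getD i 0
            · -- ramp fits: A marks [i, i+L) and recurses; B recurses with 1 - L
              have hchk : ((List.range L.toNat).all fun j =>
                  decide (i + j < line.length) && (line.getD (i + j) 0 == line.getD i 0)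
                    && !built.getD (i + j) false) = true := by
                rw [List.all_eq_true]
                intro j hj
                rw [List.mem_range] at hj
                obtain ⟨hj1, hj2⟩ := hok j hj
                simp only [Bool.and_eq_true, decide_eq_true_eq, beq_iff_eq, Bool.not_eq_true']
                refine ⟨⟨hj1, hj2⟩, ?_⟩
                rw [hb (i + j) (by omega) hj1]
                simp
                omega
              rw [hchk, if_pos rfl, if_neg (by omega)]
              have hrN' : i + L.toNat ≤ line.length := by
                have := (hok (L.toNat - 1) (by omega)).1
                omega
              apply ih (i + 1) _ (1 - L) i (i + L.toNat) (by omega) (by omega) (by omega)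
                (by omega) (by omega) (by omega)
              · intro m hm1 hm2
                have hmi : m = i := by omega
                subst hmi
                rfl
              · right
                intro hcontra
                omega
              · rw [pvFoldSetLen]
                exact hbl
              · intro m hm1 hm2
                by_cases hmr : m < i + L.toNat
                · rw [pvFoldSetGetD_in _ _ _ _ (by omega)
                    ⟨m - i, by rw [List.mem_range]; omega, by omega⟩]
                  simp
                  omega
                · rw [pvFoldSetGetD_notin _ _ _ _ (by
                    intro j hj
                    rw [List.mem_range] at hj
                    omega)]
                  rw [hb m (by omega) hm2]
                  simp
                  omega
              · intro m hm1 hm2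
                simp only [Nat.add_sub_cancel]
                have hm := (hok (m - i) (by omega)).2
                rw [show i + (m - i) = m by omega] at hm
                exact hm
            · -- ramp does not fit: A fails its look-ahead; B's counter goes negative, stays so
              obtain ⟨j0, hj0⟩ := not_forall.mp hok
              rw [Classical.not_imp] at hj0
              obtain ⟨hj0L, hj0ne⟩ := hj0
              have hj0' : ¬ (i + j0 < line.length) ∨ line.getD (i + j0) 0 ≠ line.getD i 0 := by
                by_cases h1 : i + j0 < line.length
                · exact Or.inr (fun he => hj0ne ⟨h1, he⟩)
                · exact Or.inl h1
              have hj0pos : 1 ≤ j0 := by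
                by_contra hcj
                have hj00 : j0 = 0 := by omega
                subst hj00
                rcases hj0' with h1 | h2
                · omega
                · exact h2 rfl
              have hfail : ((List.range L.toNat).all fun j =>
                  decide (i + j < line.length) && (line.getD (i + j) 0 == line.getD i 0)
                    && !built.getD (i + j) false) = false := by
                rw [List.all_eq_false]
                refine ⟨j0, by rw [List.mem_range]; omega, ?_⟩
                simp only [Bool.and_eq_true, decide_eq_true_eq, beq_iff_eq, Bool.not_eq_true']
                intro hcontra
                rcases hj0' with h1 | h2
                · exact h1 hcontra.1.1
                · exact h2 hcontra.1.2
              rw [hfail, if_neg (by simp), if_neg (by omega)]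
              symm
              apply pvBStuck line L hL k (i + 1) (1 - L)
              intro j hj hchain
              by_contra hcon
              have hchain' : ∀ j' < j, line.getD (i + 1 + j') 0 = line.getD (i + j') 0 := by
                intro j' hj'
                have hc := hchain j' hj'
                rw [show i + 1 + j' - 1 = i + j' by omega] at hc
                exact hc
              have hallj := pvChainEq line i j hchain'
              have h2 : line.getD (i + j0) 0 = line.getD i 0 := hallj j0 (by omega)
              rcases hj0' with h3 | h4
              · omega
              · exact h4 h2
        · -- flat step
          have heq : line.getD i 0 = line.getD (i - 1) 0 := by omega
          rw [pvA_step_flat _ _ _ _ _ _ heq, pvB_step_flat _ _ _ _ _ (by omega)]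
          apply ih (i + 1) built (cnt + 1) s r (by omega) (by omega) (by omega) hsr hrN (by omega)
          · intro m hm1 hm2
            simp only [Nat.add_sub_cancel]
            by_cases hmi : m < i
            · rw [hrun m hm1 hmi, heq]
            · have hmi' : m = i := by omega
              subst hmi'
              rfl
          · exact hmin
          · exact hbl
          · exact hb
          · intro m hm1 hm2
            simp only [Nat.add_sub_cancel]
            rw [hP3 m (by omega) hm2, heq]

-- for L ≤ 0 both programs degenerate to the adjacent-difference check
lemma pvMainNeg (line : List Int) (L : Int) (hL : L ≤ 0) :
    ∀ (k i : Nat) (built : List Bool) (cnt : Int), 0 ≤ cnt →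
      pvAGo line L line.length built (List.range' i k) = pvBGo line L cnt (List.range' i k) := by
  have hL0 : L.toNat = 0 := by omega
  intro k
  induction k with
  | zero =>
    intro i built cnt hcnt
    simp [pvAGo, pvBGo]
    omega
  | succ k ih =>
    intro i built cnt hcnt
    rw [List.range'_succ]
    by_cases hbig : (line.getD i 0 - line.getD (i - 1) 0).natAbs > 1
    · rw [pvA_step_big _ _ _ _ _ _ hbig,
          pvB_step_bad _ _ _ _ _ (by omega) (by omega) (by omega)]
    · by_cases hup : line.getD i 0 = line.getD (i - 1) 0 + 1
      · rw [pvA_step_up _ _ _ _ _ _ hup, pvB_step_up _ _ _ _ _ (by omega)]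
        rw [hL0]
        simp only [List.range'_zero, List.all_nil, List.foldl_nil]
        rw [if_pos trivial, if_neg (by omega)]
        exact ih (i + 1) _ 1 (by omega)
      · by_cases hdn : line.getD i 0 = line.getD (i - 1) 0 - 1
        · rw [pvA_step_dn _ _ _ _ _ _ hup hdn, pvB_step_dn _ _ _ _ _ (by omega)]
          rw [hL0]
          simp only [List.range_zero, List.all_nil, List.foldl_nil]
          rw [if_pos trivial, if_neg (by omega)]
          exact ih (i + 1) _ (1 - L) (by omega)
        · have heq : line.getD i 0 = line.getD (i - 1) 0 := by omega
          rw [pvA_step_flat _ _ _ _ _ _ heq, pvB_step_flat _ _ _ _ _ (by omega)]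
          exact ih (i + 1) built (cnt + 1) (by omega)

lemma pvReplicateGetD (n m : Nat) : (List.replicate n false).getD m false = false := by
  simp [List.getD_eq_getElem?_getD, List.getElem?_replicate]
  split <;> rfl

-- ===== VERDICT (by name: the statement is the Claim_ definition above) =====
theorem can_build_slope_spec : Claim_equal_can_build_slope := by
  intro line L _
  unfold Spec_can_build_slope can_build_slope can_build_slope_alt
  cases line with
  | nil => rfl
  | cons x xs =>
    show pvAGo (x :: xs) L (x :: xs).length (List.replicate (x :: xs).length false)
          (List.range' 1 ((x :: xs).length - 1))
        = pvBGo (x :: xs) L (if (x :: xs).isEmpty then 0 else 1)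
          (List.range' 1 ((x :: xs).length - 1))
    rw [show ((if (x :: xs).isEmpty then (0 : Int) else 1)) = 1 by simp]
    by_cases hL : 1 ≤ L
    · apply pvMainPos (x :: xs) L hL ((x :: xs).length - 1) 1 _ 1 0 0
        (by omega) (by simp; omega) (by omega) (by omega) (by omega) (by omega)
      · intro m hm1 hm2
        have hm0 : m = 0 := by omega
        subst hm0
        rfl
      · left
        rfl
      · simp
      · intro m hm1 hm2
        rw [pvReplicateGetD]
        simp
      · intro m hm1 hm2
        omega
    · exact pvMainNeg (x :: xs) L (by omega) _ 1 _ 1 (by omega)
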